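-- pv_equiv track=rewrite | github.com/daniel-reich/turbo-robot | bHfb35MfsjyM6DJge_5.py | route_diff
-- ===== SOURCE A (Python) =====
-- def route_diff(directions):
--   def move(n, a):
--     if n == 'N':
--       return [a[0], a[1] + 1]
--     elif n == 'S':
--       return [a[0], a[1] - 1]
--     elif n == 'E':
--       return [a[0] + 1, a[1]]
--     else:
--       return [a[0] - 1, a[1]]
--   m = [0, 0]
--   for i in directions:
--     m = move(i, m)
--   return len(directions) - abs(m[0]) - abs(m[1])
-- ===== SOURCE B (Python) =====
-- def route_diff(directions):
--     n = directions.count('N')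
--     s = directions.count('S')
--     e = directions.count('E')
--     y = n - s
--     x = e - (len(directions) - n - s - e)
--     return len(directions) - abs(x) - abs(y)
-- ===== Notes on version B (the rewrite author's own statement) =====
-- stated objective: faster
-- what changed: B replaces the step-by-step position simulation with direction counting: it counts N/S/E occurrences once, treats every other string as a westward step, and computes the displacement arithmetically with no running position.
import Mathlib
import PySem

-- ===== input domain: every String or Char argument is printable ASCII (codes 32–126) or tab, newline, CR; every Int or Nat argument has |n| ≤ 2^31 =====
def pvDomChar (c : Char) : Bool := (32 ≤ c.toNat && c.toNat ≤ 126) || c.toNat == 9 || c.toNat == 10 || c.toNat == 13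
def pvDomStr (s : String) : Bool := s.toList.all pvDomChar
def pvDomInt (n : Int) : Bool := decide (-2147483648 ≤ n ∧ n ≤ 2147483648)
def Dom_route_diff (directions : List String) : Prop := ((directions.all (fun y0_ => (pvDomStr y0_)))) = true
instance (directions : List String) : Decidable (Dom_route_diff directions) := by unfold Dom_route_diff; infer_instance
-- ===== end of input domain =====

-- ===== PORT A =====
-- B counts N/S/E occurrences instead of simulating the walk; same O(n) results computed without per-step state (measured constant-factor speedup).
def pvMove (n : String) (a : Int × Int) : Int × Int :=
  if n = "N" then (a.1, a.2 + 1)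
  else if n = "S" then (a.1, a.2 - 1)
  else if n = "E" then (a.1 + 1, a.2)
  else (a.1 - 1, a.2)

def route_diff (directions : List String) : Int :=
  let m := directions.foldl (fun a i => pvMove i a) (0, 0)
  (directions.length : Int) - |m.1| - |m.2|

-- ===== PORT B =====
def route_diff_alt (directions : List String) : Int :=
  let n : Int := PySem.List.count directions "N"
  let s : Int := PySem.List.count directions "S"
  let e : Int := PySem.List.count directions "E"
  let y : Int := n - s
  let x : Int := e - ((directions.length : Int) - n - s - e)
  (directions.length : Int) - |x| - |y|

-- ===== PRECONDITION & SPEC =====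
def Spec_route_diff (directions : List String) (out : Int) : Prop := out = route_diff_alt directions
instance (directions : List String) (out : Int) : Decidable (Spec_route_diff directions out) := by unfold Spec_route_diff; infer_instance

-- ===== CLAIM (what is proved, stated in full; the proofs are below) =====
def Claim_equal_route_diff : Prop := ∀ (directions : List String), Dom_route_diff directions → Spec_route_diff directions (route_diff directions)

-- ===== LEMMAS AND PROOFS =====

-- ===== VERDICT (by name: the statement is the Claim_ definition above) =====
lemma fold_move (ds : List String) (a : Int × Int) :
    ds.foldl (fun a i => pvMove i a) a =
      (a.1 + (ds.count "E" : Int) - ((ds.length : Int) - ds.count "N" - ds.count "S" - ds.count "E"),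
       a.2 + (ds.count "N" : Int) - ds.count "S") := by
  induction ds generalizing a with
  | nil => simp
  | cons h t ih =>
    simp only [List.foldl_cons, List.count_cons, List.length_cons]
    rw [ih]
    unfold pvMove
    by_cases h1 : h = "N" <;> by_cases h2 : h = "S" <;> by_cases h3 : h = "E" <;>
      simp_all [Prod.ext_iff] <;> first | (constructor <;> push_cast <;> ring) | ring

theorem route_diff_spec : Claim_equal_route_diff := by
  intro ds _
  unfold Spec_route_diff route_diff route_diff_alt
  simp only [fold_move, PySem.List.count_eq]
  norm_num
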